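-- pv_equiv track=rewrite | github.com/Lucas-PCN/restaurant-orders | src/analyze_log.py | which_days_never_visited
-- ===== SOURCE A (Python) =====
-- def which_days_never_visited(person_name, orders):
--     all_days = set()
--     days_visited_by_someone = set()
--
--     for _, _, weekday in orders:
--         all_days.add(weekday)
--
--     for customer, _, day in orders:
--         if customer == person_name:
--             days_visited_by_someone.add(day)
--
--     return all_days - days_visited_by_someone
-- ===== SOURCE B (Python) =====
-- def which_days_never_visited(person_name, orders):
--     by_day = {}
--     for customer, _, weekday in orders:
--         by_day.setdefault(weekday, set()).add(customer)
--     return {day for day, names in by_day.items() if person_name not in names}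
-- ===== Notes on version B (the rewrite author's own statement) =====
-- stated objective: alternative
-- what changed: Replaces A's two separate passes (set of all weekdays, set of weekdays the person visited) and a set subtraction by one pass building a dict grouping each weekday to the set of customers seen that day, then filtering the dict's entries for days whose customer set lacks the person.
import Mathlib
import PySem

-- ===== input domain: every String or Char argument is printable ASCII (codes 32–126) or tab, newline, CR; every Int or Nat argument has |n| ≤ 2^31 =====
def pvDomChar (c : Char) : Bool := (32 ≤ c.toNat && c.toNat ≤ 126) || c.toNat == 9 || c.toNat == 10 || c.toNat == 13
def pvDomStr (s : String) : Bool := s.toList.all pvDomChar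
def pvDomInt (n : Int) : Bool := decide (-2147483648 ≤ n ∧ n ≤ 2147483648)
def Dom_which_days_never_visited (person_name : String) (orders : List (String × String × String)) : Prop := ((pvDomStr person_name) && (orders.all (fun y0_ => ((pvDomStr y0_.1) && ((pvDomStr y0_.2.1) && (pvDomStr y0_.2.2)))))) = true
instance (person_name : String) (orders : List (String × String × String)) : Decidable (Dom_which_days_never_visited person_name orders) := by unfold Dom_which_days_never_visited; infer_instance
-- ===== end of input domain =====

-- B groups orders into one dict weekday → set of customers and filters its entries,
-- instead of A's two separate passes building two sets and subtracting them (objective: alternative).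

-- ===== PORT A =====
def which_days_never_visited (person_name : String) (orders : List (String × String × String)) : List String :=
  let all_days : PySem.Set String :=
    orders.foldl (fun s x => PySem.Set.add s x.2.2) PySem.Set.empty
  let days_visited_by_someone : PySem.Set String :=
    orders.foldl (fun s x => if x.1 == person_name then PySem.Set.add s x.2.2 else s) PySem.Set.empty
  PySem.Set.diff all_days days_visited_by_someone

-- ===== PORT B =====
def which_days_never_visited_alt (person_name : String) (orders : List (String × String × String)) : List String :=
  let by_day : PySem.Dict String (PySem.Set String) :=
    orders.foldl (fun d x => d.modify x.2.2 PySem.Set.empty (fun s => PySem.Set.add s x.1)) PySem.Dict.empty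
  PySem.Set.ofList ((by_day.items.filter (fun kv => !(PySem.Set.contains kv.2 person_name))).map Prod.fst)

-- ===== PRECONDITION & SPEC =====
def Spec_which_days_never_visited (person_name : String) (orders : List (String × String × String)) (out : List String) : Prop := out = which_days_never_visited_alt person_name orders
instance (person_name : String) (orders : List (String × String × String)) (out : List String) : Decidable (Spec_which_days_never_visited person_name orders out) := by unfold Spec_which_days_never_visited; infer_instance

-- ===== CLAIM (what is proved, stated in full; the proofs are below) =====
def Claim_equal_which_days_never_visited : Prop := ∀ (person_name : String) (orders : List (String × String × String)), Dom_which_days_never_visited person_name orders → Spec_which_days_never_visited person_name orders (which_days_never_visited person_name orders)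

-- ===== LEMMAS AND PROOFS =====

-- membership in an added-to set
theorem pv_contains_add (s : PySem.Set String) (y z : String) :
    PySem.Set.contains (PySem.Set.add s y) z = (s.contains z || z == y) := by
  simp [PySem.Set.add, PySem.Set.contains]
  by_cases h : y ∈ s
  · simp [h]
    by_cases hz : z = y <;> simp [hz, h]
  · simp [h]
    simp only [beq_eq_decide]

-- A's visited-set characterised: day is in it iff some order by person_name has that weekday
theorem pv_visited_contains (person_name day : String) (orders : List (String × String × String))
    (s0 : PySem.Set String) :
    PySem.Set.contains
      (orders.foldl (fun s x => if x.1 == person_name then PySem.Set.add s x.2.2 else s) s0) day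
    = (s0.contains day || orders.any (fun x => x.1 == person_name && x.2.2 == day)) := by
  induction orders generalizing s0 with
  | nil => simp
  | cons x xs ih =>
    simp only [List.foldl_cons, List.any_cons]
    by_cases h : x.1 == person_name
    · rw [if_pos h, ih, pv_contains_add]
      cases hs : s0.contains day <;> cases hd : x.2.2 == day <;>
        simp [h, hd, BEq.comm (a := day)]
    · rw [if_neg h, ih]
      simp [h]

-- B's grouped dict characterised: person_name is in the group of a day iff such an order exists
theorem pv_group_contains (person_name day : String) (orders : List (String × String × String))
    (d0 : PySem.Dict String (PySem.Set String)) :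
    PySem.Set.contains
      ((orders.foldl (fun d x => d.modify x.2.2 PySem.Set.empty (fun s => PySem.Set.add s x.1)) d0).getD day PySem.Set.empty) person_name
    = ((d0.getD day PySem.Set.empty).contains person_name
        || orders.any (fun x => x.1 == person_name && x.2.2 == day)) := by
  induction orders generalizing d0 with
  | nil => simp
  | cons x xs ih =>
    simp only [List.foldl_cons, List.any_cons]
    rw [ih, PySem.Dict.getD_modify]
    by_cases h : day = x.2.2
    · rw [if_pos h, pv_contains_add]
      cases hp : x.1 == person_name <;>
        simp [h, hp, BEq.comm (a := person_name)]
    · rw [if_neg h]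
      have hb : (x.2.2 == day) = false := beq_eq_false_iff_ne.mpr (fun hh => h hh.symm)
      simp [hb]

-- filtering a mapped list then projecting back
theorem pv_filter_map_fst {α β : Type} (l : List α) (g : α → β) (q : α × β → Bool) :
    ((l.map (fun a => (a, g a))).filter q).map Prod.fst
      = l.filter (fun a => q (a, g a)) := by
  induction l with
  | nil => rfl
  | cons a t ih =>
    simp only [List.map_cons, List.filter_cons]
    by_cases h : q (a, g a) <;> simp [h, ih]

theorem which_days_never_visited_spec' (person_name : String)
    (orders : List (String × String × String)) :
    which_days_never_visited person_name orders = which_days_never_visited_alt person_name orders := by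
  simp only [which_days_never_visited, which_days_never_visited_alt]
  set by_day := orders.foldl (fun d x => d.modify x.2.2 PySem.Set.empty (fun s => PySem.Set.add s x.1)) PySem.Dict.empty with hbd
  have hnodup : by_day.keys.Nodup := by
    rw [hbd]
    exact PySem.Dict.nodup_keys_foldl_modify_key orders (fun x => x.2.2) PySem.Set.empty
      (fun d x s => PySem.Set.add s x.1) PySem.Dict.empty (by simp)
  have hkeys : by_day.keys = PySem.Set.ofList (orders.map (fun x => x.2.2)) := by
    rw [hbd, PySem.Dict.keys_foldl_modify_key]
    simp [PySem.Set.update_nil_left]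
  have hitems := PySem.Dict.items_eq_map_keys by_day hnodup PySem.Set.empty
  rw [hitems, pv_filter_map_fst]
  -- all_days as ofList of the weekday column
  have hall : orders.foldl (fun s x => PySem.Set.add s x.2.2) PySem.Set.empty
      = PySem.Set.ofList (orders.map (fun x => x.2.2)) := by
    rw [← PySem.Set.update_map_eq_foldl_add]
    simp [PySem.Set.update_nil_left]
  rw [hall, hkeys]
  simp only []
  have hfilter_nodup : (PySem.Set.ofList (orders.map (fun x => x.2.2))).Nodup := by
    exact PySem.Set.nodup_ofList _
  rw [PySem.Set.ofList_eq_self_of_nodup _ (List.Nodup.filter (fun a => !(by_day.getD a PySem.Set.empty).contains person_name) hfilter_nodup)]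
  -- both sides are filters of the same list; show the predicates agree
  show PySem.Set.diff _ _ = _
  simp only [PySem.Set.diff]
  apply List.filter_congr
  intro day _
  rw [pv_visited_contains, pv_group_contains]
  simp

-- ===== VERDICT (by name: the statement is the Claim_ definition above) =====
theorem which_days_never_visited_spec : Claim_equal_which_days_never_visited := by
  intro p orders _
  exact which_days_never_visited_spec' p orders
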